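-- pv_equiv track=rewrite | github.com/cihanw/BTC_trade_bot | live_model_runtime.py | infer_atr_base_col
-- ===== SOURCE A (Python) =====
-- def infer_atr_base_col(col_name: str, available_columns: list[str]) -> str | None:
--     suffix_map = {
--         "_macd_signal": "_atr_14",
--         "_macd_hist": "_atr_14",
--         "_macd": "_atr_14",
--     }
--     for suffix, replacement in suffix_map.items():
--         if col_name.endswith(suffix):
--             candidate = f"{col_name[:-len(suffix)]}{replacement}"
--             if candidate in available_columns:
--                 return candidate
--     return None
-- ===== SOURCE B (Python) =====
-- def infer_atr_base_col(col_name: str, available_columns: list[str]) -> str | None: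
--     head, sep, tail = col_name.rpartition("_macd")
--     if sep and tail in ("", "_signal", "_hist"):
--         candidate = head + "_atr_14"
--         if candidate in available_columns:
--             return candidate
--     return None
-- ===== Notes on version B (the rewrite author's own statement) =====
-- stated objective: simpler
-- what changed: Replaces the three endswith-and-slice iterations over the suffix map with a single rpartition on '_macd' followed by one tail-membership test, since all three suffixes share the base and the same replacement.
import Mathlib
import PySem

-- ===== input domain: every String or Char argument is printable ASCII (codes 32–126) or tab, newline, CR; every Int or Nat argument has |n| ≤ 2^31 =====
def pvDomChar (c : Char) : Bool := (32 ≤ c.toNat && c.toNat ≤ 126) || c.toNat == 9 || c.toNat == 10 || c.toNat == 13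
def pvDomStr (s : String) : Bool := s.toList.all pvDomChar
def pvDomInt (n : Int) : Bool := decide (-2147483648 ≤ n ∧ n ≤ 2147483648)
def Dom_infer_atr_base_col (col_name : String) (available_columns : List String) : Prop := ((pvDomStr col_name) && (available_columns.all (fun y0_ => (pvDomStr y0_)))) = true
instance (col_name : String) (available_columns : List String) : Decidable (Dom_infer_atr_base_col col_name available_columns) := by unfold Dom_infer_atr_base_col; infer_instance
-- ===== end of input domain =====

-- B replaces A's three endswith checks with a single rpartition on '_macd'; objective: simpler decomposition.

-- ===== PORT A =====
-- the for-loop over suffix_map.items(), as structural recursion over the literal pair list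
def inferLoopA (col_name : String) (available_columns : List String) : List (String × String) → Option String
  | [] => none
  | (suffix, replacement) :: rest =>
    if PySem.Str.endswith col_name suffix then
      -- candidate = f"{col_name[:-len(suffix)]}{replacement}"
      let candidate := String.ofList ((PySem.Str.slice col_name none (some (-(PySem.Str.len suffix)))).toList ++ replacement.toList)
      if candidate ∈ available_columns then some candidate
      else inferLoopA col_name available_columns rest
    else inferLoopA col_name available_columns rest

def infer_atr_base_col (col_name : String) (available_columns : List String) : Option String :=
  inferLoopA col_name available_columns
    [("_macd_signal", "_atr_14"), ("_macd_hist", "_atr_14"), ("_macd", "_atr_14")]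

-- ===== PORT B =====
-- hand port of str.rpartition(pat) for the fixed non-empty pat, on code points (exact: finds the
-- LAST occurrence of pat; none = no occurrence, i.e. Python's ('', '', s) case)
def rpartB (pat : List Char) : List Char → Option (List Char × List Char)
  | [] => none
  | c :: rest =>
    match rpartB pat rest with
    | some (h, t) => some (c :: h, t)
    | none => if pat.isPrefixOf (c :: rest) then some ([], (c :: rest).drop pat.length) else none

def infer_atr_base_col_alt (col_name : String) (available_columns : List String) : Option String :=
  match rpartB "_macd".toList col_name.toList with
  | none => none
  | some (head, tail) =>
    if tail = [] ∨ tail = "_signal".toList ∨ tail = "_hist".toList then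
      let candidate := String.ofList (head ++ "_atr_14".toList)
      if candidate ∈ available_columns then some candidate else none
    else none

-- ===== PRECONDITION & SPEC =====
def Spec_infer_atr_base_col (col_name : String) (available_columns : List String) (out : Option String) : Prop := out = infer_atr_base_col_alt col_name available_columns
instance (col_name : String) (available_columns : List String) (out : Option String) : Decidable (Spec_infer_atr_base_col col_name available_columns out) := by unfold Spec_infer_atr_base_col; infer_instance

-- ===== CLAIM (what is proved, stated in full; the proofs are below) =====
def Claim_equal_infer_atr_base_col : Prop := ∀ (col_name : String) (available_columns : List String), Dom_infer_atr_base_col col_name available_columns → Spec_infer_atr_base_col col_name available_columns (infer_atr_base_col col_name available_columns)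

-- ===== LEMMAS AND PROOFS =====

-- rpartB propagates an occurrence found in the tail (later occurrences win)
theorem rpartB_append (pat pre t h tt : List Char) (hr : rpartB pat t = some (h, tt)) :
    rpartB pat (pre ++ t) = some (pre ++ h, tt) := by
  induction pre with
  | nil => simpa using hr
  | cons c pre ih => simp [rpartB, ih]

-- soundness: a result decomposes the input around the pattern
theorem rpartB_sound (pat : List Char) : ∀ (cs h t : List Char), rpartB pat cs = some (h, t) → cs = h ++ pat ++ t := by
  intro cs
  induction cs with
  | nil => intro h t hr; simp [rpartB] at hr
  | cons c rest ih =>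
    intro h t hr
    simp only [rpartB] at hr
    cases hrec : rpartB pat rest with
    | some p =>
      obtain ⟨h', t'⟩ := p
      rw [hrec] at hr
      simp only [Option.some.injEq, Prod.mk.injEq] at hr
      obtain ⟨rfl, rfl⟩ := hr
      have := ih h' t' hrec
      simp [this]
    | none =>
      rw [hrec] at hr
      by_cases hp : pat.isPrefixOf (c :: rest)
      · simp only [hp, if_true, Option.some.injEq, Prod.mk.injEq] at hr
        obtain ⟨rfl, rfl⟩ := hr
        obtain ⟨suf, hsuf⟩ := List.isPrefixOf_iff_prefix.mp hp
        simp only [List.nil_append, ← hsuf, List.drop_left']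
      · simp [hp] at hr

-- a suffix of a suffix (shorter one is a suffix of the longer)
theorem suffix_of_suffix {α : Type} (l1 l2 cs : List α) (h1 : l1 <:+ cs) (h2 : l2 <:+ cs)
    (hle : l1.length ≤ l2.length) : l1 <:+ l2 := by
  have hA : l1.reverse <+: cs.reverse := List.reverse_prefix.mpr h1
  have hB : l2.reverse <+: cs.reverse := List.reverse_prefix.mpr h2
  have := List.prefix_of_prefix_length_le hA hB (by simpa using hle)
  simpa using List.reverse_prefix.mp this

theorem endswith_iff_suffix (s suf : String) :
    PySem.Str.endswith s suf = true ↔ suf.toList <:+ s.toList := by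
  rw [PySem.Str.endswith_eq]
  exact PySem.Chars.endswith_iff _ _

-- if col_name ends with suf and rpartB of suf itself gives ([], tt), rpartB of col_name gives (p, tt)
theorem rpart_of_endswith (cn suf : String) (tt : List Char)
    (hsr : rpartB "_macd".toList suf.toList = some ([], tt))
    (he : PySem.Str.endswith cn suf = true) :
    ∃ p, p ++ suf.toList = cn.toList ∧ rpartB "_macd".toList cn.toList = some (p, tt) := by
  obtain ⟨p, hp⟩ := (endswith_iff_suffix cn suf).mp he
  refine ⟨p, hp, ?_⟩
  rw [← hp]
  simpa using rpartB_append _ p _ _ _ hsr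

-- A's candidate prefix col_name[:-k] is the head when col_name = head ++ suffix, |suffix| = k
theorem slice_cut (cn : String) (hh suf : List Char) (hcs : cn.toList = hh ++ suf)
    (k : Nat) (hk : 0 < k) (hlen : suf.length = k) :
    (PySem.Str.slice cn none (some (-(k : Int)))).toList = hh := by
  have h1 : (PySem.Str.slice cn none (some (-(k : Int)))).toList
      = PySem.List.slice cn.toList none (some (-(k : Int))) := by simp
  rw [h1, PySem.List.slice_to_neg_natCast _ k hk, hcs]
  rw [show (hh ++ suf).length - k = hh.length by simp [hlen]]
  exact List.take_left

theorem infer_atr_base_col_spec : Claim_equal_infer_atr_base_col := by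
  intro cn avail _
  unfold Spec_infer_atr_base_col infer_atr_base_col infer_atr_base_col_alt
  cases hr : rpartB "_macd".toList cn.toList with
  | none =>
    have h1 : PySem.Str.endswith cn "_macd_signal" = false := by
      rcases Bool.eq_false_or_eq_true (PySem.Str.endswith cn "_macd_signal") with hb | hb
      · obtain ⟨p, _, hq⟩ := rpart_of_endswith cn "_macd_signal" "_signal".toList (by decide) hb
        rw [hq] at hr; cases hr
      · exact hb
    have h2 : PySem.Str.endswith cn "_macd_hist" = false := by
      rcases Bool.eq_false_or_eq_true (PySem.Str.endswith cn "_macd_hist") with hb | hb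
      · obtain ⟨p, _, hq⟩ := rpart_of_endswith cn "_macd_hist" "_hist".toList (by decide) hb
        rw [hq] at hr; cases hr
      · exact hb
    have h3 : PySem.Str.endswith cn "_macd" = false := by
      rcases Bool.eq_false_or_eq_true (PySem.Str.endswith cn "_macd") with hb | hb
      · obtain ⟨p, _, hq⟩ := rpart_of_endswith cn "_macd" [] (by decide) hb
        rw [hq] at hr; cases hr
      · exact hb
    simp only [inferLoopA]
    rw [h1, h2, h3]
    simp
  | some p =>
    obtain ⟨h, t⟩ := p
    have hcs : cn.toList = h ++ "_macd".toList ++ t := rpartB_sound _ _ _ _ hr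
    by_cases ht1 : t = "_signal".toList
    · subst ht1
      have hcs' : cn.toList = h ++ "_macd_signal".toList := by simpa using hcs
      have hsig : PySem.Str.endswith cn "_macd_signal" = true :=
        (endswith_iff_suffix _ _).mpr ⟨h, hcs'.symm⟩
      have hhist : PySem.Str.endswith cn "_macd_hist" = false := by
        rcases Bool.eq_false_or_eq_true (PySem.Str.endswith cn "_macd_hist") with hb | hb
        · exfalso
          have := suffix_of_suffix "_macd_hist".toList "_macd_signal".toList cn.toList
            ((endswith_iff_suffix _ _).mp hb) ((endswith_iff_suffix _ _).mp hsig) (by decide)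
          revert this; decide
        · exact hb
      have hmacd : PySem.Str.endswith cn "_macd" = false := by
        rcases Bool.eq_false_or_eq_true (PySem.Str.endswith cn "_macd") with hb | hb
        · exfalso
          have := suffix_of_suffix "_macd".toList "_macd_signal".toList cn.toList
            ((endswith_iff_suffix _ _).mp hb) ((endswith_iff_suffix _ _).mp hsig) (by decide)
          revert this; decide
        · exact hb
      have hcut := slice_cut cn h "_macd_signal".toList hcs' 12 (by omega) (by decide)
      simp only [inferLoopA]
      rw [show -(PySem.Str.len "_macd_signal") = -(((12 : Nat)) : Int) by decide, hcut, hsig, hhist, hmacd]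
      simp
    · by_cases ht2 : t = "_hist".toList
      · subst ht2
        have hcs' : cn.toList = h ++ "_macd_hist".toList := by simpa using hcs
        have hhist : PySem.Str.endswith cn "_macd_hist" = true :=
          (endswith_iff_suffix _ _).mpr ⟨h, hcs'.symm⟩
        have hsig : PySem.Str.endswith cn "_macd_signal" = false := by
          rcases Bool.eq_false_or_eq_true (PySem.Str.endswith cn "_macd_signal") with hb | hb
          · exfalso
            have := suffix_of_suffix "_macd_hist".toList "_macd_signal".toList cn.toList
              ((endswith_iff_suffix _ _).mp hhist) ((endswith_iff_suffix _ _).mp hb) (by decide)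
            revert this; decide
          · exact hb
        have hmacd : PySem.Str.endswith cn "_macd" = false := by
          rcases Bool.eq_false_or_eq_true (PySem.Str.endswith cn "_macd") with hb | hb
          · exfalso
            have := suffix_of_suffix "_macd".toList "_macd_hist".toList cn.toList
              ((endswith_iff_suffix _ _).mp hb) ((endswith_iff_suffix _ _).mp hhist) (by decide)
            revert this; decide
          · exact hb
        have hcut := slice_cut cn h "_macd_hist".toList hcs' 10 (by omega) (by decide)
        simp only [inferLoopA]
        rw [show -(PySem.Str.len "_macd_hist") = -(((10 : Nat)) : Int) by decide, hcut, hsig, hhist, hmacd]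
        simp
      · by_cases ht0 : t = []
        · subst ht0
          have hcs' : cn.toList = h ++ "_macd".toList := by simpa using hcs
          have hmacd : PySem.Str.endswith cn "_macd" = true :=
            (endswith_iff_suffix _ _).mpr ⟨h, hcs'.symm⟩
          have hsig : PySem.Str.endswith cn "_macd_signal" = false := by
            rcases Bool.eq_false_or_eq_true (PySem.Str.endswith cn "_macd_signal") with hb | hb
            · exfalso
              have := suffix_of_suffix "_macd".toList "_macd_signal".toList cn.toList
                ((endswith_iff_suffix _ _).mp hmacd) ((endswith_iff_suffix _ _).mp hb) (by decide)
              revert this; decide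
            · exact hb
          have hhist : PySem.Str.endswith cn "_macd_hist" = false := by
            rcases Bool.eq_false_or_eq_true (PySem.Str.endswith cn "_macd_hist") with hb | hb
            · exfalso
              have := suffix_of_suffix "_macd".toList "_macd_hist".toList cn.toList
                ((endswith_iff_suffix _ _).mp hmacd) ((endswith_iff_suffix _ _).mp hb) (by decide)
              revert this; decide
            · exact hb
          have hcut := slice_cut cn h "_macd".toList hcs' 5 (by omega) (by decide)
          simp only [inferLoopA]
          rw [show -(PySem.Str.len "_macd") = -(((5 : Nat)) : Int) by decide, hcut, hsig, hhist, hmacd]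
          simp
        · -- tail is none of '', '_signal', '_hist': both sides return none
          have h1 : PySem.Str.endswith cn "_macd_signal" = false := by
            rcases Bool.eq_false_or_eq_true (PySem.Str.endswith cn "_macd_signal") with hb | hb
            · obtain ⟨p, _, hq⟩ := rpart_of_endswith cn "_macd_signal" "_signal".toList (by decide) hb
              rw [hq] at hr; cases hr; exact absurd rfl ht1
            · exact hb
          have h2 : PySem.Str.endswith cn "_macd_hist" = false := by
            rcases Bool.eq_false_or_eq_true (PySem.Str.endswith cn "_macd_hist") with hb | hb
            · obtain ⟨p, _, hq⟩ := rpart_of_endswith cn "_macd_hist" "_hist".toList (by decide) hb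
              rw [hq] at hr; cases hr; exact absurd rfl ht2
            · exact hb
          have h3 : PySem.Str.endswith cn "_macd" = false := by
            rcases Bool.eq_false_or_eq_true (PySem.Str.endswith cn "_macd") with hb | hb
            · obtain ⟨p, _, hq⟩ := rpart_of_endswith cn "_macd" [] (by decide) hb
              rw [hq] at hr; cases hr; exact absurd rfl ht0
            · exact hb
          simp only [inferLoopA]
          rw [h1, h2, h3]
          simp [ht0]
          rintro (rfl | rfl)
          · exact absurd rfl ht1
          · exact absurd rfl ht2
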